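-- pv_equiv track=rewrite | github.com/RutherfordOP/Pest-Detection-Using-DJI-Mavic-Drone-in-Webots | non_ideal_case_ai_robotics_project_final_main/controllers/tester/tester.py | inflate_cells
-- ===== SOURCE A (Python) =====
-- def inflate_cells(cells,Wg,Hg,r=1):
--     out=set()
--     for i,j in cells:
--         for di in range(-r,r+1):
--             for dj in range(-r,r+1):
--                 ii=i+di; jj=j+dj
--                 if 0<=ii<Wg and 0<=jj<Hg: out.add((ii,jj))
--     return out
-- ===== SOURCE B (Python) =====
-- def inflate_cells(cells, Wg, Hg, r=1):
--     # separable square dilation: horizontal pass (i-axis bound only), then vertical pass (j-axis bound only)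
--     H = set()
--     for i, j in cells:
--         for ii in range(max(0, i - r), min(Wg, i + r + 1)):
--             H.add((ii, j))
--     out = set()
--     for ii, j in H:
--         for jj in range(max(0, j - r), min(Hg, j + r + 1)):
--             out.add((ii, jj))
--     return out
-- ===== Notes on version B (the rewrite author's own statement) =====
-- stated objective: alternative
-- what changed: Replaces the single nested per-cell square scan with a combined bounds test by a separable dilation: a horizontal pass over clamped i-ranges building an intermediate set H, then a vertical pass over clamped j-ranges of H, doing O(n*r + |H|*r) set insertions instead of O(n*r^2).
import Mathlib
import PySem

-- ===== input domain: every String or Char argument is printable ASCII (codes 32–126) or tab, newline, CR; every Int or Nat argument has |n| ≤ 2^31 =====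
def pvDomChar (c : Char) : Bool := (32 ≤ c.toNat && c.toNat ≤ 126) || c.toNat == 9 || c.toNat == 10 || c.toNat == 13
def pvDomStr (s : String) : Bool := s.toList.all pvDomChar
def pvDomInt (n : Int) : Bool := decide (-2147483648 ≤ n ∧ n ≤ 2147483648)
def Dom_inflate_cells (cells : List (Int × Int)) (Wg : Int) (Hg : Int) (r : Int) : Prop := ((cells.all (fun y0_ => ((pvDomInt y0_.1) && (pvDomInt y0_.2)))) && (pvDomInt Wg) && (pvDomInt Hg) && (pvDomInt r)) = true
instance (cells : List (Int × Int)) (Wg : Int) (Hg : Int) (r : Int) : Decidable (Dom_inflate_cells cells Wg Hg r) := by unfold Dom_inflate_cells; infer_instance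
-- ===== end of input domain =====

-- B replaces A's per-cell square scan (combined bounds test) by a separable dilation: a
-- horizontal pass into an intermediate set H, then a vertical pass over H (fewer set insertions
-- when squares overlap). NOTE: the Python B returns a set; the list equality proved here is in
-- PySem's insertion-order model of sets.

-- ===== PORT A =====
def inflate_cells (cells : List (Int × Int)) (Wg : Int) (Hg : Int) (r : Int) : List (Int × Int) :=
  cells.foldl (fun out c =>
    (PySem.List.pyRange (-r) (r+1) 1).foldl (fun out di =>
      (PySem.List.pyRange (-r) (r+1) 1).foldl (fun out dj =>
        if 0 ≤ c.1 + di ∧ c.1 + di < Wg ∧ 0 ≤ c.2 + dj ∧ c.2 + dj < Hg then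
          PySem.Set.add out (c.1 + di, c.2 + dj)
        else out) out) out)
    PySem.Set.empty

-- ===== PORT B =====
def inflate_cells_alt (cells : List (Int × Int)) (Wg : Int) (Hg : Int) (r : Int) : List (Int × Int) :=
  let H : PySem.Set (Int × Int) := cells.foldl (fun H c =>
    (PySem.List.pyRange (max 0 (c.1 - r)) (min Wg (c.1 + r + 1)) 1).foldl
      (fun H ii => PySem.Set.add H (ii, c.2)) H) PySem.Set.empty
  H.foldl (fun out p =>
    (PySem.List.pyRange (max 0 (p.2 - r)) (min Hg (p.2 + r + 1)) 1).foldl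
      (fun out jj => PySem.Set.add out (p.1, jj)) out) PySem.Set.empty

-- ===== PRECONDITION & SPEC =====
def Spec_inflate_cells (cells : List (Int × Int)) (Wg : Int) (Hg : Int) (r : Int) (out : List (Int × Int)) : Prop := out = inflate_cells_alt cells Wg Hg r
instance (cells : List (Int × Int)) (Wg : Int) (Hg : Int) (r : Int) (out : List (Int × Int)) : Decidable (Spec_inflate_cells cells Wg Hg r out) := by unfold Spec_inflate_cells; infer_instance

-- ===== CLAIM (what is proved, stated in full; the proofs are below) =====
def Claim_equal_inflate_cells : Prop := ∀ (cells : List (Int × Int)) (Wg : Int) (Hg : Int) (r : Int), Dom_inflate_cells cells Wg Hg r → Spec_inflate_cells cells Wg Hg r (inflate_cells cells Wg Hg r)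

-- ===== LEMMAS AND PROOFS =====

-- a fold of updates is one update by the flatMap
theorem pv_foldl_update {α β : Type} [BEq β] (l : List α) (f : α → List β) (s : PySem.Set β) :
    l.foldl (fun s x => PySem.Set.update s (f x)) s = PySem.Set.update s (l.flatMap f) := by
  induction l generalizing s with
  | nil => simp [PySem.Set.update]
  | cons x t ih => simp [List.flatMap_cons, ih, PySem.Set.update_append]

-- updating with elements already present does nothing
theorem pv_update_of_subset {β : Type} [BEq β] [LawfulBEq β] (s : PySem.Set β) (ys : List β)
    (h : ∀ y ∈ ys, y ∈ s) : PySem.Set.update s ys = s := by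
  rw [PySem.Set.update_eq_append_filter]
  have hnil : (PySem.Set.ofList ys).filter (fun y => !(PySem.Set.contains s y)) = [] := by
    apply List.filter_eq_nil_iff.mpr
    intro y hy
    have hys : y ∈ ys := by
      have := PySem.Set.mem_ofList (xs := ys) (y := y)
      simp_all
    simp [h y hys]
  simp
  exact h

-- dedup commutes with flatMap on the left argument
theorem pv_ofList_flatMap_ofList {α β : Type} [BEq α] [LawfulBEq α] [BEq β] [LawfulBEq β]
    (L : List α) (g : α → List β) :
    PySem.Set.ofList ((PySem.Set.ofList L).flatMap g) = PySem.Set.ofList (L.flatMap g) := by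
  induction L using List.reverseRecOn with
  | nil => rfl
  | append_singleton t x ih =>
    by_cases hx : x ∈ t
    · have hx' : x ∈ PySem.Set.ofList t := by simp [PySem.Set.mem_ofList, hx]
      rw [PySem.Set.ofList_append_singleton, PySem.Set.add_of_mem hx', ih]
      rw [List.flatMap_append, PySem.Set.ofList_append, List.flatMap_cons, List.flatMap_nil,
        List.append_nil]
      refine (pv_update_of_subset _ _ ?_).symm
      intro y hy
      rw [PySem.Set.mem_ofList]
      exact List.mem_flatMap.mpr ⟨x, hx, hy⟩
    · have hx' : x ∉ PySem.Set.ofList t := by simp [PySem.Set.mem_ofList, hx]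
      rw [PySem.Set.ofList_append_singleton, PySem.Set.add_of_not_mem hx']
      rw [List.flatMap_append, List.flatMap_append, PySem.Set.ofList_append,
        PySem.Set.ofList_append, ih]

-- the in-bounds shifts of a centred range form the clamped range
theorem pv_range_clamp (i W r : Int) :
    ((PySem.List.pyRange (-r) (r+1) 1).filter
        (fun d => decide (0 ≤ i + d ∧ i + d < W))).map (fun d => i + d) =
      PySem.List.pyRange (max 0 (i - r)) (min W (i + r + 1)) 1 := by
  have hperm : (((PySem.List.pyRange (-r) (r+1) 1).filter
        (fun d => decide (0 ≤ i + d ∧ i + d < W))).map (fun d => i + d)).Perm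
      (PySem.List.pyRange (max 0 (i - r)) (min W (i + r + 1)) 1) := by
    apply (List.perm_ext_iff_of_nodup ?_ ?_).mpr
    · intro y
      simp only [List.mem_map, List.mem_filter, PySem.List.mem_pyRange_one, decide_eq_true_eq]
      constructor
      · rintro ⟨d, ⟨⟨h1, h2⟩, h3, h4⟩, rfl⟩
        omega
      · intro hy
        exact ⟨y - i, ⟨by omega, by omega⟩, by omega⟩
    · apply List.Nodup.map (fun a b h => by omega)
      exact (PySem.List.nodup_pyRange_one _ _).filter _
    · exact (PySem.List.pairwise_lt_pyRange_one _ _).nodup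
  apply List.Perm.eq_of_pairwise (le := fun (a b : Int) => a < b)
    (fun a b _ _ h1 h2 => by omega) ?_ ?_ hperm
  · apply List.pairwise_map.mpr
    exact ((PySem.List.pairwise_lt_pyRange_one _ _).filter _).imp (fun h => by omega)
  · exact PySem.List.pairwise_lt_pyRange_one _ _

-- a flatMap whose body is an if-then-[] is a flatMap over the filter
theorem pv_flatMap_ite_nil {α β : Type} (l : List α) (p : α → Prop) [DecidablePred p]
    (g : α → List β) :
    l.flatMap (fun x => if p x then g x else []) = (l.filter (fun x => decide (p x))).flatMap g := by
  induction l with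
  | nil => rfl
  | cons x t ih =>
    by_cases hx : p x <;> simp [hx, ih]

-- A's per-cell contribution, rewritten as clamped row × clamped column
theorem pv_perCell (Wg Hg r : Int) (c : Int × Int) :
    (PySem.List.pyRange (-r) (r+1) 1).flatMap (fun di =>
        ((PySem.List.pyRange (-r) (r+1) 1).filter (fun dj =>
            decide (0 ≤ c.1 + di ∧ c.1 + di < Wg ∧ 0 ≤ c.2 + dj ∧ c.2 + dj < Hg))).map
          (fun dj => (c.1 + di, c.2 + dj))) =
      (PySem.List.pyRange (max 0 (c.1 - r)) (min Wg (c.1 + r + 1)) 1).flatMap (fun ii =>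
        (PySem.List.pyRange (max 0 (c.2 - r)) (min Hg (c.2 + r + 1)) 1).map (fun jj => (ii, jj))) := by
  have hinner : ∀ ii : Int,
      ((PySem.List.pyRange (-r) (r+1) 1).filter (fun dj =>
          decide (0 ≤ c.2 + dj ∧ c.2 + dj < Hg))).map (fun dj => (ii, c.2 + dj)) =
        (PySem.List.pyRange (max 0 (c.2 - r)) (min Hg (c.2 + r + 1)) 1).map (fun jj => (ii, jj)) := by
    intro ii
    rw [← pv_range_clamp c.2 Hg r, List.map_map]
    rfl
  have hstep : (fun di : Int =>
      ((PySem.List.pyRange (-r) (r+1) 1).filter (fun dj =>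
          decide (0 ≤ c.1 + di ∧ c.1 + di < Wg ∧ 0 ≤ c.2 + dj ∧ c.2 + dj < Hg))).map
        (fun dj => (c.1 + di, c.2 + dj))) =
      (fun di : Int => if 0 ≤ c.1 + di ∧ c.1 + di < Wg then
        (PySem.List.pyRange (max 0 (c.2 - r)) (min Hg (c.2 + r + 1)) 1).map
          (fun jj => (c.1 + di, jj)) else []) := by
    funext di
    by_cases h : 0 ≤ c.1 + di ∧ c.1 + di < Wg
    · rw [if_pos h, ← hinner (c.1 + di)]
      congr 1
      apply List.filter_congr
      intro dj _
      simp [h.1, h.2]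
    · rw [if_neg h]
      simp only [List.map_eq_nil_iff]
      apply List.filter_eq_nil_iff.mpr
      intro dj _
      simp only [decide_eq_true_eq]
      tauto
  rw [hstep, pv_flatMap_ite_nil _ (fun di => 0 ≤ c.1 + di ∧ c.1 + di < Wg),
    ← pv_range_clamp c.1 Wg r, List.flatMap_map]

-- ===== VERDICT (by name: the statement is the Claim_ definition above) =====
-- A as one deduplicated flat list
theorem pv_A_eq (cells : List (Int × Int)) (Wg Hg r : Int) :
    inflate_cells cells Wg Hg r =
      PySem.Set.ofList (cells.flatMap (fun c =>
        (PySem.List.pyRange (-r) (r+1) 1).flatMap (fun di =>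
          ((PySem.List.pyRange (-r) (r+1) 1).filter (fun dj =>
              decide (0 ≤ c.1 + di ∧ c.1 + di < Wg ∧ 0 ≤ c.2 + dj ∧ c.2 + dj < Hg))).map
            (fun dj => (c.1 + di, c.2 + dj))))) := by
  unfold inflate_cells
  have h1 : (fun (out : PySem.Set (Int × Int)) (c : Int × Int) =>
      (PySem.List.pyRange (-r) (r+1) 1).foldl (fun out di =>
        (PySem.List.pyRange (-r) (r+1) 1).foldl (fun out dj =>
          if 0 ≤ c.1 + di ∧ c.1 + di < Wg ∧ 0 ≤ c.2 + dj ∧ c.2 + dj < Hg then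
            PySem.Set.add out (c.1 + di, c.2 + dj)
          else out) out) out) =
      (fun out c => PySem.Set.update out
        ((PySem.List.pyRange (-r) (r+1) 1).flatMap (fun di =>
          ((PySem.List.pyRange (-r) (r+1) 1).filter (fun dj =>
              decide (0 ≤ c.1 + di ∧ c.1 + di < Wg ∧ 0 ≤ c.2 + dj ∧ c.2 + dj < Hg))).map
            (fun dj => (c.1 + di, c.2 + dj))))) := by
    funext out c
    have h2 : (fun (out : PySem.Set (Int × Int)) (di : Int) =>
        (PySem.List.pyRange (-r) (r+1) 1).foldl (fun out dj =>
          if 0 ≤ c.1 + di ∧ c.1 + di < Wg ∧ 0 ≤ c.2 + dj ∧ c.2 + dj < Hg then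
            PySem.Set.add out (c.1 + di, c.2 + dj)
          else out) out) =
        (fun out di => PySem.Set.update out
          (((PySem.List.pyRange (-r) (r+1) 1).filter (fun dj =>
              decide (0 ≤ c.1 + di ∧ c.1 + di < Wg ∧ 0 ≤ c.2 + dj ∧ c.2 + dj < Hg))).map
            (fun dj => (c.1 + di, c.2 + dj)))) := by
      funext out di
      rw [PySem.List.foldl_ite_eq_foldl_filter, ← PySem.Set.update_map_eq_foldl_add]
    rw [h2, pv_foldl_update]
  rw [h1, pv_foldl_update]
  rfl

-- B as one deduplicated flat list over the deduplicated horizontal pass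
theorem pv_B_eq (cells : List (Int × Int)) (Wg Hg r : Int) :
    inflate_cells_alt cells Wg Hg r =
      PySem.Set.ofList ((PySem.Set.ofList (cells.flatMap (fun c =>
          (PySem.List.pyRange (max 0 (c.1 - r)) (min Wg (c.1 + r + 1)) 1).map
            (fun ii => (ii, c.2))))).flatMap (fun p =>
        (PySem.List.pyRange (max 0 (p.2 - r)) (min Hg (p.2 + r + 1)) 1).map
          (fun jj => (p.1, jj)))) := by
  unfold inflate_cells_alt
  have h1 : (fun (H : PySem.Set (Int × Int)) (c : Int × Int) =>
      (PySem.List.pyRange (max 0 (c.1 - r)) (min Wg (c.1 + r + 1)) 1).foldl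
        (fun H ii => PySem.Set.add H (ii, c.2)) H) =
      (fun H c => PySem.Set.update H
        ((PySem.List.pyRange (max 0 (c.1 - r)) (min Wg (c.1 + r + 1)) 1).map
          (fun ii => (ii, c.2)))) := by
    funext H c
    rw [← PySem.Set.update_map_eq_foldl_add]
  have h2 : (fun (out : PySem.Set (Int × Int)) (p : Int × Int) =>
      (PySem.List.pyRange (max 0 (p.2 - r)) (min Hg (p.2 + r + 1)) 1).foldl
        (fun out jj => PySem.Set.add out (p.1, jj)) out) =
      (fun out p => PySem.Set.update out
        ((PySem.List.pyRange (max 0 (p.2 - r)) (min Hg (p.2 + r + 1)) 1).map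
          (fun jj => (p.1, jj)))) := by
    funext out p
    rw [← PySem.Set.update_map_eq_foldl_add]
  simp only [h1, h2, pv_foldl_update]
  rfl

-- ===== VERDICT (by name: the statement is the Claim_ definition above) =====
theorem inflate_cells_spec : Claim_equal_inflate_cells := by
  intro cells Wg Hg r _
  unfold Spec_inflate_cells
  rw [pv_A_eq, pv_B_eq, pv_ofList_flatMap_ofList, List.flatMap_assoc]
  congr 1
  apply List.flatMap_congr
  intro c _
  rw [List.flatMap_map]
  simpa using pv_perCell Wg Hg r c
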